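-- pv_equiv track=rewrite | github.com/damian-damjanovic-hn/Product-Onboarding | prod_dash.py | _build_header_map
-- ===== SOURCE A (Python) =====
-- def _build_header_map(hdrs_norm):
--     """Map various source names to our target schema."""
--     # target: sku,name,price,stock,category,status,image_path,description
--     synonyms = {
--         "sku": {"sku","productcode","code","itemcode","id","productid"},
--         "name": {"name","title","productname","descriptionshort","itemname"},
--         "price": {"price","unitprice","sellprice","rrp","priceex","priceinctax"},
--         "stock": {"stock","qty","quantity","onhand","inventory"},
--         "category": {"category","cat","segment"},
--         "status": {"status","state","enabled","active"},
--         "image_path": {"image","imagepath","imageurl","picture","img"},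
--         "description": {"description","longdescription","fulldescription","details","notes"}
--     }
--     mapping = {}
--     for target, keys in synonyms.items():
--         for i, src in enumerate(hdrs_norm):
--             if src in keys:
--                 mapping[target] = i
--                 break
--     return mapping
-- ===== SOURCE B (Python) =====
-- def _build_header_map(hdrs_norm):
--     """Map various source names to our target schema."""
--     # Reverse index: synonym -> target, written out once; then a single pass
--     # over the headers records the first header matching each target.
--     rev = {
--         "sku": "sku", "productcode": "sku", "code": "sku", "itemcode": "sku",
--         "id": "sku", "productid": "sku",
--         "name": "name", "title": "name", "productname": "name",
--         "descriptionshort": "name", "itemname": "name",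
--         "price": "price", "unitprice": "price", "sellprice": "price",
--         "rrp": "price", "priceex": "price", "priceinctax": "price",
--         "stock": "stock", "qty": "stock", "quantity": "stock",
--         "onhand": "stock", "inventory": "stock",
--         "category": "category", "cat": "category", "segment": "category",
--         "status": "status", "state": "status", "enabled": "status", "active": "status",
--         "image": "image_path", "imagepath": "image_path", "imageurl": "image_path",
--         "picture": "image_path", "img": "image_path",
--         "description": "description", "longdescription": "description",
--         "fulldescription": "description", "details": "description", "notes": "description",
--     }
--     best = {}
--     for i, h in enumerate(hdrs_norm):
--         t = rev.get(h)
--         if t is not None and t not in best: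
--             best[t] = i
--     targets = ["sku", "name", "price", "stock", "category", "status",
--                "image_path", "description"]
--     return {t: best[t] for t in targets if t in best}
-- ===== Notes on version B (the rewrite author's own statement) =====
-- stated objective: faster
-- what changed: B inverts the synonym table into a literal synonym-to-target dictionary and finds all targets' first matching headers in a single pass over the header list, then emits them in fixed target order; A rescans the header list once per target.
import Mathlib
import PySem

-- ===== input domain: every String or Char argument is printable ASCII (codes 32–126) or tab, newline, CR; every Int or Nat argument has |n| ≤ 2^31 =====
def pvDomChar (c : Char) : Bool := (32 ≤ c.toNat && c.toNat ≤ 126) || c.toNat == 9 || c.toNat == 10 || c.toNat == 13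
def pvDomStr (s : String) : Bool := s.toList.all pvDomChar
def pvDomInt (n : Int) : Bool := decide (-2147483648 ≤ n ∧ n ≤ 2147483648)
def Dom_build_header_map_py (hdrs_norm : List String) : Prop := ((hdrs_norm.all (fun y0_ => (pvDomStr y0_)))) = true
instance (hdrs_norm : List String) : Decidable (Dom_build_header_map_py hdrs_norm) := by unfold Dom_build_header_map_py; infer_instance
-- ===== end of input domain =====

-- B inverts the synonym table into one synonym→target dictionary and finds every
-- target's first matching header in a SINGLE pass over the headers (no per-target rescans).

-- ===== PORT A =====
-- the synonyms dict of A (sets ported as lists of their distinct elements)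
def pvSynsA : List (String × List String) := [
  ("sku", ["sku","productcode","code","itemcode","id","productid"]),
  ("name", ["name","title","productname","descriptionshort","itemname"]),
  ("price", ["price","unitprice","sellprice","rrp","priceex","priceinctax"]),
  ("stock", ["stock","qty","quantity","onhand","inventory"]),
  ("category", ["category","cat","segment"]),
  ("status", ["status","state","enabled","active"]),
  ("image_path", ["image","imagepath","imageurl","picture","img"]),
  ("description", ["description","longdescription","fulldescription","details","notes"])]

-- A's inner loop: 'for i, src in enumerate(hdrs_norm): if src in keys: …; break'
def pvFirstMatch (keys : List String) (hdrs : List String) (i : Int) : Option Int :=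
  match hdrs with
  | [] => none
  | h :: t => if h ∈ keys then some i else pvFirstMatch keys t (i + 1)

def build_header_map_py (hdrs_norm : List String) : List (String × Int) :=
  (pvSynsA.foldl (fun m tk =>
      match pvFirstMatch tk.2 hdrs_norm 0 with
      | some i => m.insert tk.1 i
      | none => m) (PySem.Dict.empty : PySem.Dict String Int)).items

-- ===== PORT B =====
-- Source B's literal reverse dict 'rev' (synonym → target); keys are distinct
def pvRevPairs : List (String × String) := [
  ("sku","sku"),("productcode","sku"),("code","sku"),("itemcode","sku"),("id","sku"),("productid","sku"),
  ("name","name"),("title","name"),("productname","name"),("descriptionshort","name"),("itemname","name"),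
  ("price","price"),("unitprice","price"),("sellprice","price"),("rrp","price"),("priceex","price"),("priceinctax","price"),
  ("stock","stock"),("qty","stock"),("quantity","stock"),("onhand","stock"),("inventory","stock"),
  ("category","category"),("cat","category"),("segment","category"),
  ("status","status"),("state","status"),("enabled","status"),("active","status"),
  ("image","image_path"),("imagepath","image_path"),("imageurl","image_path"),("picture","image_path"),("img","image_path"),
  ("description","description"),("longdescription","description"),("fulldescription","description"),("details","description"),("notes","description")]

def pvRev : PySem.Dict String String := PySem.Dict.mk pvRevPairs

-- Source B: 'for i, h in enumerate(hdrs_norm): t = rev.get(h); if t is not None and t not in best: best[t] = i'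
def pvBuildBest (hdrs : List String) (i : Int) (best : PySem.Dict String Int) : PySem.Dict String Int :=
  match hdrs with
  | [] => best
  | h :: rest =>
    pvBuildBest rest (i + 1)
      (match pvRev.get? h with
       | some t => if best.contains t then best else best.insert t i
       | none => best)

def pvTargets : List String := ["sku","name","price","stock","category","status","image_path","description"]

def build_header_map_py_alt (hdrs_norm : List String) : List (String × Int) :=
  let best := pvBuildBest hdrs_norm 0 (PySem.Dict.empty : PySem.Dict String Int)
  -- '{t: best[t] for t in targets if t in best}'
  (pvTargets.foldl (fun m t =>
      match best.get? t with
      | some v => m.insert t v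
      | none => m) (PySem.Dict.empty : PySem.Dict String Int)).items

-- ===== PRECONDITION & SPEC =====
def Spec_build_header_map_py (hdrs_norm : List String) (out : List (String × Int)) : Prop := out = build_header_map_py_alt hdrs_norm
instance (hdrs_norm : List String) (out : List (String × Int)) : Decidable (Spec_build_header_map_py hdrs_norm out) := by unfold Spec_build_header_map_py; infer_instance

-- ===== CLAIM (what is proved, stated in full; the proofs are below) =====
def Claim_equal_build_header_map_py : Prop := ∀ (hdrs_norm : List String), Dom_build_header_map_py hdrs_norm → Spec_build_header_map_py hdrs_norm (build_header_map_py hdrs_norm)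

-- ===== LEMMAS AND PROOFS =====

-- every synonym of a target is mapped to that target by the reverse dict
theorem pv_rev_complete : ∀ p ∈ pvSynsA, ∀ h, h ∈ p.2 → pvRev.get? h = some p.1 := by
  intro p hp
  fin_cases hp <;> (intro h hm; fin_cases hm <;> rfl)

-- the reverse dict maps only the synonyms of a target to it
theorem pv_rev_sound : ∀ p ∈ pvSynsA, ∀ h, pvRev.get? h = some p.1 → h ∈ p.2 := by
  intro p hp h hg
  have hm : (h, p.1) ∈ pvRev.items := PySem.Dict.mem_items_of_get?_eq_some pvRev hg
  have hm' : (h, p.1) ∈ pvRevPairs := hm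
  fin_cases hp <;>
    (simp only [pvRevPairs, List.mem_cons, List.not_mem_nil, or_false, Prod.mk.injEq] at hm'
     simp_all)

-- one pass with the reverse dict finds the first header matching any synonym of t
theorem pv_best_get (t : String) (keys : List String)
    (h1 : ∀ h, h ∈ keys → pvRev.get? h = some t)
    (h2 : ∀ h, pvRev.get? h = some t → h ∈ keys) :
    ∀ (hdrs : List String) (i : Int) (d : PySem.Dict String Int),
      (pvBuildBest hdrs i d).get? t =
        match d.get? t with
        | some v => some v
        | none => pvFirstMatch keys hdrs i := by
  intro hdrs
  induction hdrs with
  | nil => intro i d; cases hd : d.get? t <;> simp [pvBuildBest, pvFirstMatch, hd]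
  | cons h rest ih =>
    intro i d
    rw [pvBuildBest, ih]
    cases hg : pvRev.get? h with
    | none =>
      have hnm : h ∉ keys := fun hm => by rw [h1 h hm] at hg; cases hg
      cases hd : d.get? t <;> simp [pvFirstMatch, hnm]
    | some t' =>
      by_cases ht : t' = t
      · subst ht
        have hmem : h ∈ keys := h2 h hg
        by_cases hc : d.contains t' = true
        · have hsome : (d.get? t').isSome := by
            rw [← PySem.Dict.contains_eq_isSome_get?]; exact hc
          cases hd : d.get? t' with
          | none => rw [hd] at hsome; cases hsome
          | some v => simp [hc, hd]
        · have hd : d.get? t' = none := by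
            rw [PySem.Dict.contains_eq_isSome_get?] at hc
            cases hx : d.get? t' <;> simp [hx] at hc ⊢
          simp [hc, hd, PySem.Dict.get?_insert_self, pvFirstMatch, hmem]
      · have hnm : h ∉ keys := fun hm => ht (Option.some.inj ((h1 h hm).symm.trans hg)).symm
        have hne : t ≠ t' := fun he => ht he.symm
        by_cases hc : d.contains t' = true <;>
          cases hd : d.get? t <;>
            simp [hc, hd, pvFirstMatch, hnm, PySem.Dict.get?_insert_of_ne d i hne]

-- the two output-building folds agree step by step
theorem pv_fold_eq (best : PySem.Dict String Int) (hdrs : List String) :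
    ∀ (syns : List (String × List String)) (ts : List String) (m : PySem.Dict String Int),
      ts = syns.map Prod.fst →
      (∀ p ∈ syns, best.get? p.1 = pvFirstMatch p.2 hdrs 0) →
      syns.foldl (fun m tk =>
          match pvFirstMatch tk.2 hdrs 0 with
          | some i => m.insert tk.1 i
          | none => m) m
      = ts.foldl (fun m t =>
          match best.get? t with
          | some v => m.insert t v
          | none => m) m := by
  intro syns
  induction syns with
  | nil => intro ts m hts _; subst hts; rfl
  | cons p rest ih =>
    intro ts m hts hall
    subst hts
    simp only [List.map, List.foldl]
    rw [hall p (List.mem_cons_self), ]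
    exact ih _ _ rfl (fun q hq => hall q (List.mem_cons_of_mem _ hq))

-- ===== VERDICT (by name: the statement is the Claim_ definition above) =====
theorem build_header_map_py_spec : Claim_equal_build_header_map_py := by
  intro hdrs _
  show build_header_map_py hdrs = build_header_map_py_alt hdrs
  simp only [build_header_map_py, build_header_map_py_alt]
  congr 1
  have hall : ∀ p ∈ pvSynsA,
      (pvBuildBest hdrs 0 (PySem.Dict.empty : PySem.Dict String Int)).get? p.1 = pvFirstMatch p.2 hdrs 0 := by
    intro p hp
    have h := pv_best_get p.1 p.2 (pv_rev_complete p hp) (pv_rev_sound p hp) hdrs 0 PySem.Dict.empty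
    simpa [PySem.Dict.get?_empty] using h
  exact pv_fold_eq (pvBuildBest hdrs 0 PySem.Dict.empty) hdrs pvSynsA pvTargets PySem.Dict.empty rfl hall
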